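-- pv_equiv track=rewrite | github.com/yongfengxu/test | esc_test/parse_tree.py | group_state_machines
-- ===== SOURCE A (Python) =====
-- def group_state_machines(state_machines):
--     "Each group is one StateMachine plus zero or more SubStateMachines"
--     result = []
--     current_group = []
--
--     def add_current_group(result, current_group):
--         if current_group:
--             result.append(list(current_group))
--             del current_group[:]
--
--     for name, is_sub_sm, statements in state_machines:
--         if not is_sub_sm:
--             add_current_group(result, current_group)
--         current_group.append((name, statements))
--     add_current_group(result, current_group)
--
--     return result
-- ===== SOURCE B (Python) =====
-- def group_state_machines(state_machines):
--     "Each group is one StateMachine plus zero or more SubStateMachines"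
--     result = []
--     i, n = 0, len(state_machines)
--     while i < n:
--         # a group runs from i up to (excluding) the next non-sub state machine
--         j = i + 1
--         while j < n and state_machines[j][1]:
--             j += 1
--         result.append([(name, statements) for name, _, statements in state_machines[i:j]])
--         i = j
--     return result
-- ===== Notes on version B (the rewrite author's own statement) =====
-- stated objective: alternative
-- what changed: Replaces A's flag-driven accumulator (buffer plus flush helper) by a run-scanning two-index loop: each iteration finds the end of the current group with an inner scan over the is_sub flags and emits the whole slice at once.
import Mathlib
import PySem

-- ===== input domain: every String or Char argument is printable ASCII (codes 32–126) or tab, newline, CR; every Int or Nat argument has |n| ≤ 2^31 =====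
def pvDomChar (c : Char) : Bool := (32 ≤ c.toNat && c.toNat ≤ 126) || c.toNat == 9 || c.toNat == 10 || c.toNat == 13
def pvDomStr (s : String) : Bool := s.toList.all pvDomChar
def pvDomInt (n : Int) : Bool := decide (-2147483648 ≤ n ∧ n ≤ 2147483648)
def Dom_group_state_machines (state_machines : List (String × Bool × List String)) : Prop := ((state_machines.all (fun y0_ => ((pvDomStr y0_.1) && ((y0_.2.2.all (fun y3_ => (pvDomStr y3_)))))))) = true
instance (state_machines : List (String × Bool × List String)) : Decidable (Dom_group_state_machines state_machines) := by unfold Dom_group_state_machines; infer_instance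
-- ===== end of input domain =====

-- B replaces A's flag-driven accumulator (buffer + flush helper) by a run-scanning
-- two-index loop that emits each group as one slice; alternative decomposition, same cost.


-- ===== PORT A =====
-- helper `add_current_group`: if the buffer is nonempty, append a copy of it and clear it
def addCurrentGroup (result : List (List (String × List String)))
    (currentGroup : List (String × List String)) :
    List (List (String × List String)) × List (String × List String) :=
  if currentGroup ≠ [] then (result ++ [currentGroup], []) else (result, currentGroup)

def group_state_machines (state_machines : List (String × Bool × List String)) :
    List (List (String × List String)) :=
  let s := state_machines.foldl
    (fun (s : List (List (String × List String)) × List (String × List String)) x =>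
      let s := if !x.2.1 then addCurrentGroup s.1 s.2 else s
      (s.1, s.2 ++ [(x.1, x.2.2)]))
    ([], [])
  (addCurrentGroup s.1 s.2).1

-- ===== PORT B =====
-- the outer while-loop of Source B, recursing on the unprocessed suffix; the inner scan
-- for the group end (slice [i:j]) is the takeWhile/dropWhile split on the is_sub flag
def altLoop (result : List (List (String × List String)))
    (rest : List (String × Bool × List String)) : List (List (String × List String)) :=
  match rest with
  | [] => result
  | x :: xs =>
    altLoop (result ++ [(x.1, x.2.2) :: (xs.takeWhile (fun y => y.2.1)).map (fun y => (y.1, y.2.2))])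
      (xs.dropWhile (fun y => y.2.1))
termination_by rest.length
decreasing_by
  simpa using Nat.lt_succ_of_le (List.length_dropWhile_le (fun y => y.2.1) xs)

def group_state_machines_alt (state_machines : List (String × Bool × List String)) :
    List (List (String × List String)) :=
  altLoop [] state_machines

-- ===== PRECONDITION & SPEC =====
def Spec_group_state_machines (state_machines : List (String × Bool × List String)) (out : List (List (String × List String))) : Prop := out = group_state_machines_alt state_machines
instance (state_machines : List (String × Bool × List String)) (out : List (List (String × List String))) : Decidable (Spec_group_state_machines state_machines out) := by unfold Spec_group_state_machines; infer_instance

-- ===== CLAIM (what is proved, stated in full; the proofs are below) =====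
def Claim_equal_group_state_machines : Prop := ∀ (state_machines : List (String × Bool × List String)), Dom_group_state_machines state_machines → Spec_group_state_machines state_machines (group_state_machines state_machines)

-- ===== LEMMAS AND PROOFS =====

-- A's loop body and the "run A's loop from state (r, c) on xs, then flush" function
def stepA (s : List (List (String × List String)) × List (String × List String))
    (x : String × Bool × List String) :
    List (List (String × List String)) × List (String × List String) :=
  let s := if !x.2.1 then addCurrentGroup s.1 s.2 else s
  (s.1, s.2 ++ [(x.1, x.2.2)])

def runA (r : List (List (String × List String))) (c : List (String × List String))
    (xs : List (String × Bool × List String)) : List (List (String × List String)) :=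
  let s := xs.foldl stepA (r, c)
  (addCurrentGroup s.1 s.2).1

theorem group_state_machines_eq_runA (xs : List (String × Bool × List String)) :
    group_state_machines xs = runA [] [] xs := rfl

theorem runA_cons (r : List (List (String × List String))) (c : List (String × List String))
    (x : String × Bool × List String) (xs : List (String × Bool × List String)) :
    runA r c (x :: xs) = runA (stepA (r, c) x).1 (stepA (r, c) x).2 xs := rfl

theorem stepA_sub (r : List (List (String × List String))) (c : List (String × List String))
    (x : String × Bool × List String) (hs : x.2.1 = true) :
    stepA (r, c) x = (r, c ++ [(x.1, x.2.2)]) := by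
  simp [stepA, hs]

theorem stepA_main (r : List (List (String × List String))) (c : List (String × List String))
    (x : String × Bool × List String) (hs : x.2.1 = false) (hc : c ≠ []) :
    stepA (r, c) x = (r ++ [c], [(x.1, x.2.2)]) := by
  simp [stepA, hs, addCurrentGroup, hc]

theorem stepA_main_nil (r : List (List (String × List String)))
    (x : String × Bool × List String) (hs : x.2.1 = false) :
    stepA (r, []) x = (r, [(x.1, x.2.2)]) := by
  simp [stepA, hs, addCurrentGroup]

theorem runA_prefix (xs : List (String × Bool × List String))
    (r : List (List (String × List String))) (c : List (String × List String)) :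
    runA r c xs = r ++ runA [] c xs := by
  induction xs generalizing r c with
  | nil =>
    simp only [runA, List.foldl_nil, addCurrentGroup]
    split <;> simp
  | cons x xs ih =>
    rw [runA_cons, runA_cons]
    by_cases hs : x.2.1
    · rw [stepA_sub r c x hs, stepA_sub [] c x hs]
      exact ih r _
    · by_cases hc : c = []
      · subst hc
        rw [stepA_main_nil r x (by simpa using hs), stepA_main_nil [] x (by simpa using hs)]
        exact ih r _
      · rw [stepA_main r c x (by simpa using hs) hc, stepA_main [] c x (by simpa using hs) hc]
        simp only [List.nil_append]
        rw [ih (r ++ [c]) [(x.1, x.2.2)], ih [c] [(x.1, x.2.2)]]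
        simp

theorem altLoop_prefix_aux (n : Nat) :
    ∀ (xs : List (String × Bool × List String)), xs.length ≤ n →
    ∀ (r : List (List (String × List String))), altLoop r xs = r ++ altLoop [] xs := by
  induction n with
  | zero =>
    intro xs hx r
    have : xs = [] := List.length_eq_zero_iff.mp (Nat.le_zero.mp hx)
    subst this; simp [altLoop]
  | succ n ih =>
    intro xs hx r
    cases xs with
    | nil => simp [altLoop]
    | cons x xs =>
      rw [altLoop, altLoop]
      have hlen : (xs.dropWhile (fun y => y.2.1)).length ≤ n :=
        Nat.le_of_lt_succ (Nat.lt_of_le_of_lt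
          (List.length_dropWhile_le (fun y => y.2.1) xs) (by simpa using hx))
      simp only [List.nil_append]
      rw [ih _ hlen (r ++ [_]), ih _ hlen [_]]
      simp

theorem altLoop_prefix (xs : List (String × Bool × List String))
    (r : List (List (String × List String))) :
    altLoop r xs = r ++ altLoop [] xs :=
  altLoop_prefix_aux xs.length xs le_rfl r

-- core invariant: running A's loop with a nonempty buffer c on xs produces the group
-- "c extended by the leading sub-run of xs" followed by B's groups of the remainder
theorem altLoop_cons_eq (g : List (String × List String))
    (d : List (String × Bool × List String)) :
    altLoop [g] d = g :: altLoop [] d := by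
  rw [altLoop_prefix]; simp

theorem runA_nonempty (xs : List (String × Bool × List String))
    (c : List (String × List String)) (hc : c ≠ []) :
    runA [] c xs =
      (c ++ (xs.takeWhile (fun y => y.2.1)).map (fun y => (y.1, y.2.2)))
        :: altLoop [] (xs.dropWhile (fun y => y.2.1)) := by
  induction xs generalizing c with
  | nil => simp [runA, addCurrentGroup, hc, altLoop]
  | cons x xs ih =>
    by_cases hs : x.2.1
    · rw [runA_cons, stepA_sub [] c x hs, ih _ (by simp),
        List.takeWhile_cons_of_pos (by simpa using hs),
        List.dropWhile_cons_of_pos (by simpa using hs)]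
      simp
    · rw [runA_cons, stepA_main [] c x (by simpa using hs) hc, runA_prefix,
        ih _ (by simp), List.takeWhile_cons_of_neg (by simpa using hs),
        List.dropWhile_cons_of_neg (by simpa using hs)]
      rw [altLoop]
      simp [altLoop_cons_eq]

theorem runA_eq_alt (xs : List (String × Bool × List String)) :
    runA [] [] xs = group_state_machines_alt xs := by
  cases xs with
  | nil => simp [runA, addCurrentGroup, group_state_machines_alt, altLoop]
  | cons x xs =>
    have h1 : runA [] [] (x :: xs) = runA [] [(x.1, x.2.2)] xs := by
      rw [runA_cons]
      by_cases hs : x.2.1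
      · rw [stepA_sub [] [] x hs]; rfl
      · rw [stepA_main_nil [] x (by simpa using hs)]
    rw [h1, runA_nonempty _ _ (by simp), group_state_machines_alt, altLoop,
      List.nil_append, altLoop_cons_eq]
    simp

-- ===== VERDICT (by name: the statement is the Claim_ definition above) =====
theorem group_state_machines_spec : Claim_equal_group_state_machines := by
  intro xs _
  unfold Spec_group_state_machines
  rw [group_state_machines_eq_runA, runA_eq_alt]
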